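-- pv_equiv track=rewrite | github.com/windyoung/kids_questions_generator | 数学加减法/QuestionEnumerate.py | plus_questions
-- ===== SOURCE A (Python) =====
-- def plus_questions(number_limit: int, is_startfrom_0: bool = False, Number_of_operations: int = 2):
--     questions = []
--     if is_startfrom_0:
--         start_number = 0
--     else:
--         start_number = 1
--     match Number_of_operations:
--         case 2:
--             for n1 in range(start_number, number_limit + 1):
--                 for n2 in range(start_number, number_limit + 1 - n1):
--                     question = "{} ＋ {} =[   ]".format(n1, n2)
--                     questions.append(question)
--
--         case 3:
--             for n1 in range(start_number, number_limit + 1):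
--                 for n2 in range(start_number, number_limit + 1 - n1):
--                     for n3 in range(start_number, number_limit + 1 - n1 - n2):
--                         question = "{} ＋ {} ＋ {} =[   ]".format(n1, n2, n3)
--                         questions.append(question)
--         case 4:
--             for n1 in range(start_number, number_limit + 1):
--                 for n2 in range(start_number, number_limit + 1 - n1):
--                     for n3 in range(start_number, number_limit + 1 - n1 - n2):
--                         for n4 in range(start_number, number_limit + 1 - n1 - n2 - n3):
--                             question = "{} ＋ {} ＋ {} ＋ {} =[   ]".format(
--                                 n1, n2, n3, n4)
--                             questions.append(question)
--     return questions
-- ===== SOURCE B (Python) =====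
-- def plus_questions(number_limit: int, is_startfrom_0: bool = False, Number_of_operations: int = 2):
--     start_number = 0 if is_startfrom_0 else 1
--
--     def gen(count, budget):
--         if count == 0:
--             yield ()
--         else:
--             for v in range(start_number, budget + 1):
--                 for rest in gen(count - 1, budget - v):
--                     yield (v,) + rest
--
--     if Number_of_operations not in (2, 3, 4):
--         return []
--     return [' \uff0b '.join(str(v) for v in t) + ' =[   ]'
--             for t in gen(Number_of_operations, number_limit)]
-- ===== Notes on version B (the rewrite author's own statement) =====
-- stated objective: alternative
-- what changed: Replaces the three hardcoded nested-loop cases (arity 2, 3, 4) with one recursive generator gen(count, budget) that enumerates all operand tuples of the given length with running budget, plus a single join-based formatter.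
import Mathlib
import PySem

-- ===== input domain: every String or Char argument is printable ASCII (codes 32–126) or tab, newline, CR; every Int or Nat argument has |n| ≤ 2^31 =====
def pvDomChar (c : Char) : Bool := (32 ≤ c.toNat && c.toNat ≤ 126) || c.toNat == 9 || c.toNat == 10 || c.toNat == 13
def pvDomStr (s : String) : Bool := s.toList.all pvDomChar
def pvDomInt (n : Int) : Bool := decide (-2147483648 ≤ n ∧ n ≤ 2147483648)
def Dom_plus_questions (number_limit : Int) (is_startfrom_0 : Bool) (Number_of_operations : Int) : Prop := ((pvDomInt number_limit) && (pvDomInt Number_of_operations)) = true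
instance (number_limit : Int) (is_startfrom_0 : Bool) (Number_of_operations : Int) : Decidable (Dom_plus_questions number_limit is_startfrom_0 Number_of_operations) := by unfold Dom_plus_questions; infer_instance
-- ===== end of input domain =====

-- B replaces A's three hardcoded nested-loop arity cases by one recursive tuple generator + a join formatter (objective: alternative).

-- ===== PORT A =====
-- literal port of A's three nested-loop cases; "{} ＋ {} =[   ]".format is ported as PySem.Int.toStr concatenation
def plus_questions (number_limit : Int) (is_startfrom_0 : Bool) (Number_of_operations : Int) : List String :=
  let start_number : Int := if is_startfrom_0 then 0 else 1
  if Number_of_operations = 2 then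
    (PySem.List.pyRange start_number (number_limit + 1) 1).foldl (fun qs n1 =>
      (PySem.List.pyRange start_number (number_limit + 1 - n1) 1).foldl (fun qs n2 =>
        qs ++ [PySem.Int.toStr n1 ++ " ＋ " ++ PySem.Int.toStr n2 ++ " =[   ]"]) qs) []
  else if Number_of_operations = 3 then
    (PySem.List.pyRange start_number (number_limit + 1) 1).foldl (fun qs n1 =>
      (PySem.List.pyRange start_number (number_limit + 1 - n1) 1).foldl (fun qs n2 =>
        (PySem.List.pyRange start_number (number_limit + 1 - n1 - n2) 1).foldl (fun qs n3 =>
          qs ++ [PySem.Int.toStr n1 ++ " ＋ " ++ PySem.Int.toStr n2 ++ " ＋ " ++ PySem.Int.toStr n3 ++ " =[   ]"]) qs) qs) []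
  else if Number_of_operations = 4 then
    (PySem.List.pyRange start_number (number_limit + 1) 1).foldl (fun qs n1 =>
      (PySem.List.pyRange start_number (number_limit + 1 - n1) 1).foldl (fun qs n2 =>
        (PySem.List.pyRange start_number (number_limit + 1 - n1 - n2) 1).foldl (fun qs n3 =>
          (PySem.List.pyRange start_number (number_limit + 1 - n1 - n2 - n3) 1).foldl (fun qs n4 =>
            qs ++ [PySem.Int.toStr n1 ++ " ＋ " ++ PySem.Int.toStr n2 ++ " ＋ " ++ PySem.Int.toStr n3 ++ " ＋ " ++ PySem.Int.toStr n4 ++ " =[   ]"]) qs) qs) qs) []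
  else []

-- ===== PORT B =====
-- port of Source B's recursive generator gen(count, budget): all tuples of length count, entries ≥ start, sum ≤ budget
def genTuples (start : Int) : Nat → Int → List (List Int)
  | 0, _ => [[]]
  | n + 1, budget =>
      (PySem.List.pyRange start (budget + 1) 1).flatMap
        (fun v => (genTuples start n (budget - v)).map (fun rest => v :: rest))

def plus_questions_alt (number_limit : Int) (is_startfrom_0 : Bool) (Number_of_operations : Int) : List String :=
  let start_number : Int := if is_startfrom_0 then 0 else 1
  if Number_of_operations = 2 ∨ Number_of_operations = 3 ∨ Number_of_operations = 4 then
    (genTuples start_number Number_of_operations.toNat number_limit).map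
      (fun t => PySem.Str.join " ＋ " (t.map PySem.Int.toStr) ++ " =[   ]")
  else []

-- ===== PRECONDITION & SPEC =====
def Spec_plus_questions (number_limit : Int) (is_startfrom_0 : Bool) (Number_of_operations : Int) (out : List String) : Prop := out = plus_questions_alt number_limit is_startfrom_0 Number_of_operations
instance (number_limit : Int) (is_startfrom_0 : Bool) (Number_of_operations : Int) (out : List String) : Decidable (Spec_plus_questions number_limit is_startfrom_0 Number_of_operations out) := by unfold Spec_plus_questions; infer_instance

-- ===== CLAIM (what is proved, stated in full; the proofs are below) =====
def Claim_equal_plus_questions : Prop := ∀ (number_limit : Int) (is_startfrom_0 : Bool) (Number_of_operations : Int), Dom_plus_questions number_limit is_startfrom_0 Number_of_operations → Spec_plus_questions number_limit is_startfrom_0 Number_of_operations (plus_questions number_limit is_startfrom_0 Number_of_operations)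

-- ===== LEMMAS AND PROOFS =====
theorem join_two (a b : String) : PySem.Str.join " ＋ " [a, b] = a ++ " ＋ " ++ b := by
  refine String.toList_inj.mp ?_
  simp [PySem.Str.toList_join, PySem.Chars.join_cons_cons]

theorem join_three (a b c : String) : PySem.Str.join " ＋ " [a, b, c] = a ++ " ＋ " ++ b ++ " ＋ " ++ c := by
  refine String.toList_inj.mp ?_
  simp [PySem.Str.toList_join, PySem.Chars.join_cons_cons]

theorem join_four (a b c d : String) : PySem.Str.join " ＋ " [a, b, c, d] = a ++ " ＋ " ++ b ++ " ＋ " ++ c ++ " ＋ " ++ d := by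
  refine String.toList_inj.mp ?_
  simp [PySem.Str.toList_join, PySem.Chars.join_cons_cons]

-- ===== VERDICT (by name: the statement is the Claim_ definition above) =====
theorem plus_questions_spec : Claim_equal_plus_questions := by
  intro L s N _
  unfold Spec_plus_questions plus_questions plus_questions_alt
  by_cases h2 : N = 2
  · subst h2
    simp [genTuples, PySem.List.foldl_append_singleton_eq_map, PySem.List.foldl_append_eq_flatMap,
      List.map_flatMap, List.flatMap_def, Function.comp_def, List.map_map, join_two, add_sub_right_comm]
  · by_cases h3 : N = 3
    · subst h3
      simp [genTuples, PySem.List.foldl_append_singleton_eq_map, PySem.List.foldl_append_eq_flatMap,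
        List.map_flatMap, List.flatMap_def, Function.comp_def, List.map_map, join_three, add_sub_right_comm]
    · by_cases h4 : N = 4
      · subst h4
        simp [genTuples, PySem.List.foldl_append_singleton_eq_map, PySem.List.foldl_append_eq_flatMap,
          List.map_flatMap, List.flatMap_def, Function.comp_def, List.map_map, join_four, add_sub_right_comm]
      · simp [h2, h3, h4]
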